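-- pv_equiv track=rewrite | github.com/bluedec/AOC-2025 | src/days/day_3.py | findBiggestTwoDigitInt
-- ===== SOURCE A (Python) =====
-- def findBiggestTwoDigitInt(bank: str) -> int:
--     lj = 0
--     idx_h = 0
--     left_digit_idx = 0
--     for i in range(0, len(bank) - 1):
--         battery_joltage = int(bank[i])
--         if battery_joltage > lj:
--             left_digit_idx += idx_h
--             idx_h = 0
--             lj = battery_joltage
--         idx_h += 1
--
--     rj = 0
--     for i in range(left_digit_idx + 1, len(bank)):
--         right_battery_joltage = int(bank[i])
--         if right_battery_joltage > rj:
--             rj = right_battery_joltage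
--
--     current_bank_max_joltage = str(lj) + str(rj)
--
--     return int(current_bank_max_joltage)
-- ===== SOURCE B (Python) =====
-- def findBiggestTwoDigitInt(bank: str) -> int:
--     if len(bank) < 2:
--         return 0
--     best_left = int(bank[0])
--     result = 0
--     for c in bank[1:]:
--         d = int(c)
--         cand = best_left * 10 + d
--         if cand > result:
--             result = cand
--         if d > best_left:
--             best_left = d
--     return result
-- ===== Notes on version B (the rewrite author's own statement) =====
-- stated objective: simpler
-- what changed: Replaces A's two-pass scheme (first loop finds the maximal digit among the first n-1 characters and the index of its first occurrence, second loop scans the suffix after that index for the best right digit, then glues the two digits via string concatenation) by a single left-to-right pass that maintains the running best left digit and the running best two-digit value.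
import Mathlib
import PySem

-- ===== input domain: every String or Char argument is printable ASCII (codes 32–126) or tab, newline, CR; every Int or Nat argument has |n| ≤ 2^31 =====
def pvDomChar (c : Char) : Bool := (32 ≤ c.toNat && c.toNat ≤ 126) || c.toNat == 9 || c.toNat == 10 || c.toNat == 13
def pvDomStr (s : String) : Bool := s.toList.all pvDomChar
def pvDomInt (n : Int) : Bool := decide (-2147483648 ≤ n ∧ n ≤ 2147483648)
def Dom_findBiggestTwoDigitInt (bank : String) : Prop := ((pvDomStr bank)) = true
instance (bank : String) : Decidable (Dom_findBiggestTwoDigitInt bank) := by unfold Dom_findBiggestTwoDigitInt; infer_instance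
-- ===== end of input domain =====

-- B is a single pass keeping a running best-left digit and best pair value, instead of A's
-- two passes (leftmost maximal digit + suffix scan) glued by string concatenation (objective: simpler).

-- int(c) for a one-character string (both Pythons apply int() to single characters);
-- `.getD 0` is unreachable under Pre_ (every character converted is a decimal digit).
def pyIntChar (c : Char) : Int := (PySem.Int.ofChars? [c]).getD 0

-- ===== PORT A =====
def findBiggestTwoDigitInt (bank : String) : Int :=
  -- first loop: lj = max digit of bank[0..n-2], left_digit_idx = index of its first occurrence
  let n : Int := PySem.Str.len bank
  let s1 := (PySem.List.pyRange 0 (n - 1) 1).foldl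
    (fun (st : Int × Int × Int) i =>
      -- st = (lj, idx_h, left_digit_idx); bank[i] is always in range here
      let bj := pyIntChar (PySem.List.pyGetD bank.toList i ' ')
      if bj > st.1 then (bj, 1, st.2.2 + st.2.1) else (st.1, st.2.1 + 1, st.2.2))
    (0, 0, 0)
  let lj := s1.1
  let ldi := s1.2.2
  -- second loop: rj = max digit of bank[left_digit_idx+1..]
  let rj := (PySem.List.pyRange (ldi + 1) n 1).foldl
    (fun rj i =>
      let r := pyIntChar (PySem.List.pyGetD bank.toList i ' ')
      if r > rj then r else rj) 0
  -- int(str(lj) + str(rj)); int() always succeeds here (lj, rj are digits)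
  (PySem.Int.ofChars? (PySem.Int.toChars lj ++ PySem.Int.toChars rj)).getD 0

-- ===== PORT B =====
def findBiggestTwoDigitInt_alt (bank : String) : Int :=
  -- if len(bank) < 2: return 0; then one pass over bank[1:]
  match bank.toList with
  | [] => 0
  | [_] => 0
  | c :: rest =>
    let s := rest.foldl
      (fun (st : Int × Int) ch =>
        -- st = (best_left, result)
        let d := pyIntChar ch
        let cand := st.1 * 10 + d
        let res := if cand > st.2 then cand else st.2
        let bl := if d > st.1 then d else st.1
        (bl, res))
      (pyIntChar c, 0)
    s.2

-- ===== PRECONDITION & SPEC =====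
-- Pre_ excludes exactly the inputs on which A raises ValueError: a string of length ≥ 2
-- containing a character that is not a decimal digit (int() is applied to every character then).
def Pre_findBiggestTwoDigitInt (bank : String) : Prop :=
  bank.toList.length < 2 ∨
    bank.toList.all (fun c => 48 ≤ c.toNat && c.toNat ≤ 57) = true
instance (bank : String) : Decidable (Pre_findBiggestTwoDigitInt bank) := by
  unfold Pre_findBiggestTwoDigitInt; infer_instance

def pvWitness_findBiggestTwoDigitInt : String := "7"

def Spec_findBiggestTwoDigitInt (bank : String) (out : Int) : Prop := out = findBiggestTwoDigitInt_alt bank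
instance (bank : String) (out : Int) : Decidable (Spec_findBiggestTwoDigitInt bank out) := by unfold Spec_findBiggestTwoDigitInt; infer_instance

-- ===== CLAIM (what is proved, stated in full; the proofs are below) =====
def Claim_equal_findBiggestTwoDigitInt : Prop := ∀ (bank : String), Dom_findBiggestTwoDigitInt bank → Pre_findBiggestTwoDigitInt bank → Spec_findBiggestTwoDigitInt bank (findBiggestTwoDigitInt bank)

-- ===== LEMMAS AND PROOFS =====

-- A's first-loop step function, on already-converted digits
def pvF1 (st : Int × Int × Int) (d : Int) : Int × Int × Int :=
  if d > st.1 then (d, 1, st.2.2 + st.2.1) else (st.1, st.2.1 + 1, st.2.2)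

-- best two-digit value formable from m followed by the digits of t (0 if t = [])
def pvPM : Int → List Int → Int
  | _, [] => 0
  | m, d :: t => max (10 * m + d) (pvPM (max m d) t)

-- index of the first occurrence of M
def pvFirstIdx (M : Int) : List Int → Nat
  | [] => 0
  | x :: xs => if x = M then 0 else pvFirstIdx M xs + 1

-- suffix strictly after the first occurrence of M
def pvRestAfter (M : Int) : List Int → List Int
  | [] => []
  | x :: xs => if x = M then xs else pvRestAfter M xs

lemma pvIteMax (a b : Int) : (if b > a then b else a) = max a b := by
  by_cases h : b > a <;> simp [h] <;> omega

lemma pvFoldlMaxPull (t : List Int) (a : Int) :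
    ∀ b : Int, t.foldl max (max a b) = max a (t.foldl max b) := by
  induction t with
  | nil => intro b; rfl
  | cons x t ih =>
    intro b
    simp only [List.foldl_cons, max_assoc]
    exact ih (max b x)

lemma pvPM_nonneg (t : List Int) : ∀ m : Int, 0 ≤ pvPM m t := by
  induction t with
  | nil => intro m; simp [pvPM]
  | cons d t ih =>
    intro m
    have := ih (max m d)
    simp only [pvPM]
    omega

lemma pvRestAfter_subset (M : Int) (l : List Int) :
    ∀ x ∈ pvRestAfter M l, x ∈ l := by
  induction l with
  | nil => simp [pvRestAfter]
  | cons y l ih =>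
    intro x hx
    simp only [pvRestAfter] at hx
    by_cases h : y = M
    · simp [h] at hx; simp [hx]
    · simp [h] at hx; exact List.mem_cons_of_mem _ (ih x hx)

lemma pvLoop1 (t : List Int) :
    ∀ lj idx ldi : Int,
      (t.foldl pvF1 (lj, idx, ldi)).1 = t.foldl max lj ∧
      (t.foldl pvF1 (lj, idx, ldi)).2.2 =
        if t.foldl max lj > lj then ldi + idx + (pvFirstIdx (t.foldl max lj) t : Int) else ldi := by
  induction t with
  | nil => intro lj idx ldi; simp
  | cons d t ih =>
    intro lj idx ldi
    simp only [List.foldl_cons, pvF1]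
    by_cases h : d > lj
    · -- update branch: state (d, 1, ldi+idx), max lj d = d
      rw [if_pos h]
      have hmax : max lj d = d := by omega
      rw [hmax]
      obtain ⟨ih1, ih2⟩ := ih d 1 (ldi + idx)
      refine ⟨ih1, ?_⟩
      rw [ih2]
      have hdle : d ≤ t.foldl max d := (PySem.List.le_foldl_max t d).1
      by_cases h2 : t.foldl max d > d
      · rw [if_pos h2, if_pos (by omega)]
        have hne : d ≠ t.foldl max d := by omega
        simp [pvFirstIdx, hne]
        ring
      · rw [if_neg h2]
        have heq : t.foldl max d = d := by omega
        rw [if_pos (by omega)]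
        simp [pvFirstIdx, heq]
    · rw [if_neg h]
      have hmax : max lj d = lj := by omega
      rw [hmax]
      obtain ⟨ih1, ih2⟩ := ih lj (idx + 1) ldi
      refine ⟨ih1, ?_⟩
      rw [ih2]
      by_cases h2 : t.foldl max lj > lj
      · rw [if_pos h2, if_pos h2]
        have hne : d ≠ t.foldl max lj := by omega
        simp [pvFirstIdx, hne]
        ring
      · rw [if_neg h2, if_neg h2]


lemma pvDropFirstIdx (M : Int) (l₁ : List Int) :
    ∀ l₂ : List Int, M ∈ l₁ →
      (l₁ ++ l₂).drop (pvFirstIdx M l₁ + 1) = pvRestAfter M (l₁ ++ l₂) := by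
  induction l₁ with
  | nil => intro l₂ h; simp at h
  | cons x xs ih =>
    intro l₂ h
    by_cases hx : x = M
    · simp [pvFirstIdx, pvRestAfter, hx]
    · have hm : M ∈ xs := by
        cases List.mem_cons.mp h with
        | inl h1 => exact absurd h1.symm hx
        | inr h1 => exact h1
      simp only [pvFirstIdx, pvRestAfter, if_neg hx, List.cons_append, List.drop_succ_cons]
      exact ih l₂ hm


lemma pvDropFirstIdxFull (M : Int) (l : List Int) (hne : l ≠ []) (hmem : M ∈ l.dropLast) :
    l.drop (pvFirstIdx M l.dropLast + 1) = pvRestAfter M l := by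
  have h := pvDropFirstIdx M l.dropLast [l.getLast hne] hmem
  rw [List.dropLast_append_getLast hne] at h
  exact h

lemma pvLoop2 (t : List Int) (a : Int) :
    t.foldl (fun rj d => if d > rj then d else rj) a = t.foldl max a :=
  PySem.List.foldl_congr_mem t _ _ a (fun acc x _ => pvIteMax acc x)

lemma pvBloop (t : List Int) :
    ∀ bl res : Int, 0 ≤ res →
      (t.foldl (fun (st : Int × Int) d =>
          (if d > st.1 then d else st.1,
           if st.1 * 10 + d > st.2 then st.1 * 10 + d else st.2)) (bl, res)).2
        = max res (pvPM bl t) := by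
  induction t with
  | nil => intro bl res h; simp [pvPM]; omega
  | cons d t ih =>
    intro bl res h
    simp only [List.foldl_cons]
    have h1 : (if d > bl then d else bl) = max bl d := by by_cases hh : d > bl <;> simp [hh] <;> omega
    have h2 : (if bl * 10 + d > res then bl * 10 + d else res) = max res (bl * 10 + d) := by
      by_cases hh : bl * 10 + d > res <;> simp [hh] <;> omega
    rw [h1, h2, ih (max bl d) (max res (bl * 10 + d)) (by omega)]
    simp only [pvPM]
    have := (max_assoc res (bl * 10 + d) (pvPM (max bl d) t))
    omega


-- the crux: A's "leftmost max digit then best suffix digit" equals B's best pair value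
lemma pvMain (t : List Int) :
    ∀ m : Int, t ≠ [] → 0 ≤ m → (∀ x ∈ t, 0 ≤ x ∧ x ≤ 9) →
      pvPM m t =
        10 * (t.dropLast.foldl max m) +
          (pvRestAfter (t.dropLast.foldl max m) (m :: t)).foldl max 0 := by
  induction t with
  | nil => intro m h; exact absurd rfl h
  | cons d t ih =>
    intro m _ hm hb
    obtain ⟨hd0, hd9⟩ := hb d (List.mem_cons_self)
    by_cases ht : t = []
    · subst ht
      simp [pvPM, pvRestAfter, List.dropLast]
      omega
    · have hb' : ∀ x ∈ t, 0 ≤ x ∧ x ≤ 9 := fun x hx => hb x (List.mem_cons_of_mem _ hx)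
      have hdrop : (d :: t).dropLast = d :: t.dropLast := List.dropLast_cons_of_ne_nil ht
      have ihh := ih (max m d) ht (by omega) hb'
      rw [hdrop]
      simp only [List.foldl_cons, pvPM]
      rw [ihh]
      have hm'le : max m d ≤ t.dropLast.foldl max (max m d) := (PySem.List.le_foldl_max _ _).1
      generalize hMg : t.dropLast.foldl max (max m d) = M at *
      by_cases hcase : m = M
      · subst hcase
        have hdm : d ≤ m := by omega
        have h1 : max m d = m := by omega
        rw [h1]
        simp only [pvRestAfter, if_pos, List.foldl_cons]
        rw [max_comm (0 : Int) d, pvFoldlMaxPull]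
        have hX : (0 : Int) ≤ t.foldl max 0 := (PySem.List.le_foldl_max t 0).1
        omega
      · have hmlt : m < M := by omega
        have hRA1 : pvRestAfter M (m :: d :: t) = pvRestAfter M (d :: t) := by
          simp [pvRestAfter, show ¬ m = M from hcase]
        have hRA2 : pvRestAfter M (max m d :: t) = pvRestAfter M (d :: t) := by
          by_cases hmd : d ≤ m
          · have h1 : max m d = m := by omega
            rw [h1]
            simp [pvRestAfter, show ¬ m = M from hcase, show ¬ d = M by omega]
          · have h1 : max m d = d := by omega
            rw [h1]
        rw [hRA1, hRA2]
        have hX : (0 : Int) ≤ (pvRestAfter M (d :: t)).foldl max 0 := (PySem.List.le_foldl_max _ 0).1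
        omega


lemma pvConcatDigits (a b : Int) (ha : 0 ≤ a) (ha9 : a ≤ 9) (hb : 0 ≤ b) (hb9 : b ≤ 9) :
    (PySem.Int.ofChars? (PySem.Int.toChars a ++ PySem.Int.toChars b)).getD 0 = 10 * a + b := by
  interval_cases a <;> interval_cases b <;> decide

lemma pvDigitBounds (c : Char)
    (h : c ∈ ['0','1','2','3','4','5','6','7','8','9']) :
    0 ≤ pyIntChar c ∧ pyIntChar c ≤ 9 := by
  fin_cases h <;> decide


-- A's first loop (over range(0, len-1)) as a fold of pvF1 over the converted digits of bank[:-1]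
lemma pvAloop1 (xs : List Char) :
    List.foldl
      (fun (st : Int × Int × Int) i =>
        if pyIntChar (PySem.List.pyGetD xs i ' ') > st.1 then
          (pyIntChar (PySem.List.pyGetD xs i ' '), 1, st.2.2 + st.2.1)
        else (st.1, st.2.1 + 1, st.2.2))
      (0, 0, 0) (PySem.List.pyRange 0 ((xs.length : Int) - 1) 1)
    = List.foldl pvF1 (0, 0, 0) ((xs.map pyIntChar).dropLast) := by
  by_cases hnil : xs = []
  · subst hnil
    simp [PySem.List.pyRange_one_eq_nil]
  · have hpos : 0 < xs.length := List.length_pos_iff.mpr hnil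
    have e1 : ((xs.length : Int) - 1) = ((xs.dropLast.length : Nat) : Int) := by
      simp [List.length_dropLast]; omega
    rw [e1]
    rw [PySem.List.foldl_congr_mem _ _
        (fun (st : Int × Int × Int) (i : Int) => pvF1 st (pyIntChar (PySem.List.pyGetD xs.dropLast i ' '))) _
        (by
          intro acc i hi
          rw [PySem.List.mem_pyRange_one] at hi
          have hlt : i < ((xs.dropLast.length : Nat) : Int) := hi.2
          have hlen2 : i < ((xs.length : Nat) : Int) := by
            simp only [List.length_dropLast] at hlt ⊢; omega
          rw [PySem.List.pyGetD_eq_getElem xs ' ' hi.1 hlen2]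
          show _ = pvF1 acc (pyIntChar (PySem.List.pyGetD xs.dropLast i ' '))
          rw [PySem.List.pyGetD_eq_getElem xs.dropLast ' ' hi.1 hlt, List.getElem_dropLast]
          rfl)]
    rw [PySem.List.foldl_pyRange_zero_pyGetD' xs.dropLast ' '
        (fun (st : Int × Int × Int) c => pvF1 st (pyIntChar c)) ((0:Int), (0:Int), (0:Int))]
    rw [← List.map_dropLast, List.foldl_map]

-- A's second loop (over range(a+1, len)) is the running max of the digits of bank[a+1:]
lemma pvAloop2 (xs : List Char) (a : Int) (ha : 0 ≤ a) :
    List.foldl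
      (fun rj i =>
        if pyIntChar (PySem.List.pyGetD xs i ' ') > rj then pyIntChar (PySem.List.pyGetD xs i ' ') else rj)
      0 (PySem.List.pyRange (a + 1) ((xs.length : Nat) : Int) 1)
    = ((xs.map pyIntChar).drop ((a + 1).toNat)).foldl max 0 := by
  rw [PySem.List.foldl_pyRange_pyGetD' xs ' '
      (fun rj c => if pyIntChar c > rj then pyIntChar c else rj) 0 (by omega : (0:Int) ≤ a + 1)]
  rw [← List.foldl_map (f := pyIntChar) (g := fun rj d => if d > rj then d else rj)]
  rw [pvLoop2, List.map_drop]

-- B's loop as pvPM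
lemma pvBbridge (c : Char) (rest : List Char) :
    (List.foldl (fun (st : Int × Int) ch =>
        (if pyIntChar ch > st.1 then pyIntChar ch else st.1,
         if st.1 * 10 + pyIntChar ch > st.2 then st.1 * 10 + pyIntChar ch else st.2))
      (pyIntChar c, 0) rest).2 = max 0 (pvPM (pyIntChar c) (rest.map pyIntChar)) := by
  rw [← pvBloop (rest.map pyIntChar) (pyIntChar c) 0 le_rfl, List.foldl_map]

-- final assembly for strings of length ≥ 2: A's two digits glued equal B's best pair value
lemma pvAssemble (c0 c1 : Char) (rest : List Char)
    (hdig : ∀ c ∈ (c0 :: c1 :: rest), c ∈ ['0','1','2','3','4','5','6','7','8','9']) :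
    (PySem.Int.ofChars?
        (PySem.Int.toChars ((((c0 :: c1 :: rest).map pyIntChar).dropLast).foldl max 0) ++
         PySem.Int.toChars ((pvRestAfter ((((c0 :: c1 :: rest).map pyIntChar).dropLast).foldl max 0)
            ((c0 :: c1 :: rest).map pyIntChar)).foldl max 0))).getD 0
    = (List.foldl (fun (st : Int × Int) ch =>
        (if pyIntChar ch > st.1 then pyIntChar ch else st.1,
         if st.1 * 10 + pyIntChar ch > st.2 then st.1 * 10 + pyIntChar ch else st.2))
      (pyIntChar c0, 0) (c1 :: rest)).2 := by
  obtain ⟨hm0, hm9⟩ := pvDigitBounds c0 (hdig c0 (by simp))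
  have hbound : ∀ x ∈ (c0 :: c1 :: rest).map pyIntChar, 0 ≤ x ∧ x ≤ 9 := by
    intro x hx
    rcases List.mem_map.mp hx with ⟨c, hc, rfl⟩
    exact pvDigitBounds c (hdig c hc)
  have hLD : (c0 :: c1 :: rest).map pyIntChar = pyIntChar c0 :: (c1 :: rest).map pyIntChar := by
    simp
  have hMeq : (((c0 :: c1 :: rest).map pyIntChar).dropLast).foldl max 0
      = ((c1 :: rest).map pyIntChar).dropLast.foldl max (pyIntChar c0) := by
    rw [hLD, List.dropLast_cons_of_ne_nil (by simp), List.foldl_cons]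
    congr 1
    omega
  -- bounds on the two glued digits
  have hM0 : (0:Int) ≤ (((c0 :: c1 :: rest).map pyIntChar).dropLast).foldl max 0 :=
    (PySem.List.le_foldl_max _ 0).1
  have hM9 : (((c0 :: c1 :: rest).map pyIntChar).dropLast).foldl max 0 ≤ 9 := by
    rcases PySem.List.foldl_max_mem (((c0 :: c1 :: rest).map pyIntChar).dropLast) 0 with h | h
    · omega
    · exact (hbound _ (List.mem_of_mem_dropLast h)).2
  have hR0 : (0:Int) ≤ (pvRestAfter ((((c0 :: c1 :: rest).map pyIntChar).dropLast).foldl max 0)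
      ((c0 :: c1 :: rest).map pyIntChar)).foldl max 0 := (PySem.List.le_foldl_max _ 0).1
  have hR9 : (pvRestAfter ((((c0 :: c1 :: rest).map pyIntChar).dropLast).foldl max 0)
      ((c0 :: c1 :: rest).map pyIntChar)).foldl max 0 ≤ 9 := by
    rcases PySem.List.foldl_max_mem (pvRestAfter ((((c0 :: c1 :: rest).map pyIntChar).dropLast).foldl max 0)
      ((c0 :: c1 :: rest).map pyIntChar)) 0 with h | h
    · omega
    · exact (hbound _ (pvRestAfter_subset _ _ _ h)).2
  rw [pvConcatDigits _ _ hM0 hM9 hR0 hR9]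
  rw [pvBbridge]
  have hnn := pvPM_nonneg ((c1 :: rest).map pyIntChar) (pyIntChar c0)
  rw [max_eq_right hnn]
  rw [pvMain ((c1 :: rest).map pyIntChar) (pyIntChar c0) (by simp) hm0
      (fun x hx => hbound x (by rw [hLD]; exact List.mem_cons_of_mem _ hx))]
  rw [hMeq, hLD]

-- ===== VERDICT (by name: the statement is the Claim_ definition above) =====
theorem findBiggestTwoDigitInt_spec : Claim_equal_findBiggestTwoDigitInt := by
  intro bank _ hpre
  unfold Spec_findBiggestTwoDigitInt findBiggestTwoDigitInt findBiggestTwoDigitInt_alt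
  unfold Pre_findBiggestTwoDigitInt at hpre
  simp only [PySem.Str.len_eq]
  revert hpre
  generalize bank.toList = xs
  intro hpre
  rcases xs with _ | ⟨c0, cs⟩
  · simp [PySem.List.pyRange_one_eq_nil]
    decide
  · rcases cs with _ | ⟨c1, rest⟩
    · simp [PySem.List.pyRange_one_eq_nil]
      decide
    · have hdig : ∀ c ∈ (c0 :: c1 :: rest), c ∈ ['0','1','2','3','4','5','6','7','8','9'] := by
        rcases hpre with h | h
        · simp at h
        · intro c hc
          have hb := List.all_eq_true.mp h c hc
          simp only [Bool.and_eq_true, decide_eq_true_eq] at hb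
          obtain ⟨h1, h2⟩ := hb
          interval_cases hcc : c.toNat <;> rw [← Char.ofNat_toNat c, hcc] <;> decide
      rw [pvAloop1]
      obtain ⟨hL1, hL2⟩ := pvLoop1 (((c0 :: c1 :: rest).map pyIntChar).dropLast) 0 0 0
      rw [hL1, hL2]
      by_cases hM0 : (((c0 :: c1 :: rest).map pyIntChar).dropLast).foldl max 0 > 0
      · rw [if_pos hM0]
        have hz : (0:Int) + 0 + ((pvFirstIdx ((((c0 :: c1 :: rest).map pyIntChar).dropLast).foldl max 0)
            (((c0 :: c1 :: rest).map pyIntChar).dropLast) : Nat) : Int)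
            = ((pvFirstIdx ((((c0 :: c1 :: rest).map pyIntChar).dropLast).foldl max 0)
            (((c0 :: c1 :: rest).map pyIntChar).dropLast) : Nat) : Int) := by omega
        rw [hz]
        rw [pvAloop2 _ _ (by positivity)]
        have htn : (((pvFirstIdx ((((c0 :: c1 :: rest).map pyIntChar).dropLast).foldl max 0)
            (((c0 :: c1 :: rest).map pyIntChar).dropLast) : Nat) : Int) + 1).toNat
            = pvFirstIdx ((((c0 :: c1 :: rest).map pyIntChar).dropLast).foldl max 0)
            (((c0 :: c1 :: rest).map pyIntChar).dropLast) + 1 := by omega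
        rw [htn]
        have hmem : (((c0 :: c1 :: rest).map pyIntChar).dropLast).foldl max 0
            ∈ ((c0 :: c1 :: rest).map pyIntChar).dropLast := by
          rcases PySem.List.foldl_max_mem (((c0 :: c1 :: rest).map pyIntChar).dropLast) 0 with h | h
          · omega
          · exact h
        have hne : (c0 :: c1 :: rest).map pyIntChar ≠ [] := by simp
        rw [pvDropFirstIdxFull _ _ hne hmem]
        exact pvAssemble c0 c1 rest hdig
      · rw [if_neg hM0]
        have hM0le : (0:Int) ≤ (((c0 :: c1 :: rest).map pyIntChar).dropLast).foldl max 0 :=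
          (PySem.List.le_foldl_max _ 0).1
        have hM00 : (((c0 :: c1 :: rest).map pyIntChar).dropLast).foldl max 0 = 0 := by omega
        have hm00 : pyIntChar c0 = 0 := by
          have h1 : pyIntChar c0 ≤ (((c0 :: c1 :: rest).map pyIntChar).dropLast).foldl max 0 := by
            have : ((c0 :: c1 :: rest).map pyIntChar).dropLast
                = pyIntChar c0 :: ((c1 :: rest).map pyIntChar).dropLast := by
              simp [List.dropLast_cons₂]
            rw [this, List.foldl_cons]
            calc pyIntChar c0 ≤ max 0 (pyIntChar c0) := le_max_right _ _
              _ ≤ _ := (PySem.List.le_foldl_max _ _).1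
          have h2 := (pvDigitBounds c0 (hdig c0 (by simp))).1
          omega
        rw [pvAloop2 _ 0 le_rfl]
        have htn : ((0:Int) + 1).toNat = 1 := by norm_num
        rw [htn]
        have hdrop : ((c0 :: c1 :: rest).map pyIntChar).drop 1
            = pvRestAfter ((((c0 :: c1 :: rest).map pyIntChar).dropLast).foldl max 0)
              ((c0 :: c1 :: rest).map pyIntChar) := by
          rw [hM00]
          simp [pvRestAfter, hm00]
        rw [hdrop]
        exact pvAssemble c0 c1 rest hdig
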